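-- pv_equiv track=rewrite | github.com/jnsp/learn-to-code-by-solving-problems | ch05/free_shirts.py | laundry
-- ===== SOURCE A (Python) =====
-- def laundry(n_shirts: int, days: int, event_days: list[int]) -> int:
--     clean_shirts = n_shirts
--     n_laundry = 0
--
--     for day in range(1, days + 1):
--         # do laundry
--         if clean_shirts == 0:
--             n_laundry += 1
--             clean_shirts = n_shirts
--
--         # wear a shirt
--         clean_shirts -= 1
--
--         # get free shirts
--         if day in event_days:
--             free_shirts = event_days.count(day)
--             n_shirts += free_shirts
--             clean_shirts += free_shirts
--
--     return n_laundry
-- ===== SOURCE B (Python) =====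
-- def _advance(loads, clean, n, d):
--     # closed jump over d event-free days: wear one load cycle at a time
--     while d > 0:
--         if clean < 0 or clean >= d:
--             return loads, clean - d
--         d -= clean + 1
--         loads += 1
--         clean = n - 1
--     return loads, clean
--
--
-- def laundry(n_shirts, days, event_days):
--     counts = {}
--     for e in event_days:
--         if 1 <= e <= days:
--             counts[e] = counts.get(e, 0) + 1
--     n = n_shirts
--     clean = n_shirts
--     loads = 0
--     cur = 1
--     for day in sorted(counts):
--         loads, clean = _advance(loads, clean, n, day - cur)
--         # the event day itself
--         if clean == 0:
--             loads += 1
--             clean = n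
--         clean -= 1
--         free = counts[day]
--         n += free
--         clean += free
--         cur = day + 1
--     loads, _ = _advance(loads, clean, n, days - cur + 1)
--     return loads
-- ===== Notes on version B (the rewrite author's own statement) =====
-- stated objective: faster
-- what changed: B replaces A's day-by-day simulation with its per-day 'day in event_days' scan by a counter of event days built once, sorted, and closed jumps over whole laundry cycles between consecutive event days.
import Mathlib
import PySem

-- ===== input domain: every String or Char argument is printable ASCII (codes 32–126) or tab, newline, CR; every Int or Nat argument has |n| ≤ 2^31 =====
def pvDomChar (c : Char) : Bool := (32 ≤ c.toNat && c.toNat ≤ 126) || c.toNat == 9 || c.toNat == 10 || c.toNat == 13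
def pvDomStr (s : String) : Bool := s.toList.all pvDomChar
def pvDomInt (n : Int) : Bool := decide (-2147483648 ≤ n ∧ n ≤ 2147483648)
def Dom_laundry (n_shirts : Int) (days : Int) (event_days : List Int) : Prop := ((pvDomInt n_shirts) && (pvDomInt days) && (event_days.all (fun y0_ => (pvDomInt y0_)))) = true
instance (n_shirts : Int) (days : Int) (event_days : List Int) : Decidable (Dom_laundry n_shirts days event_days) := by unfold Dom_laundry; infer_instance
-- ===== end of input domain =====

-- B replaces A's day-by-day simulation (with a per-day membership scan) by an event-day
-- counter plus closed jumps over whole laundry cycles between event days (alternative/faster structure).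

-- ===== PORT A =====
-- loop body of A's 'for day in range(1, days + 1)'; state (n_shirts, clean_shirts, n_laundry)
def stepA (event_days : List Int) (s : Int × Int × Int) (day : Int) : Int × Int × Int :=
  let n := s.1
  let c := s.2.1
  let L := s.2.2
  let L1 := if c = 0 then L + 1 else L
  let c1 := (if c = 0 then n else c) - 1
  if day ∈ event_days then
    let free : Int := event_days.count day
    (n + free, c1 + free, L1)
  else (n, c1, L1)

def laundry (n_shirts : Int) (days : Int) (event_days : List Int) : Int :=
  ((PySem.List.pyRange 1 (days + 1) 1).foldl (stepA event_days) (n_shirts, n_shirts, 0)).2.2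

-- ===== PORT B =====
-- Source B's helper _advance: jump over d event-free days, one laundry cycle per iteration
def advanceB (loads clean n d : Int) : Int × Int :=
  if 0 < d then
    if clean < 0 ∨ d ≤ clean then (loads, clean - d)
    else advanceB (loads + 1) (n - 1) n (d - (clean + 1))
  else (loads, clean)
termination_by d.toNat
decreasing_by omega

-- loop body of Source B's 'for day in sorted(counts)'; state (n, clean, loads, cur)
def stepB (counts : PySem.Dict Int Int) (s : Int × Int × Int × Int) (day : Int) : Int × Int × Int × Int :=
  let n := s.1
  let c := s.2.1
  let L := s.2.2.1
  let cur := s.2.2.2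
  let p := advanceB L c n (day - cur)
  let L1 := if p.2 = 0 then p.1 + 1 else p.1
  let c1 := (if p.2 = 0 then n else p.2) - 1
  let free := counts.getD day 0
  (n + free, c1 + free, L1, day + 1)

def laundry_alt (n_shirts : Int) (days : Int) (event_days : List Int) : Int :=
  let counts : PySem.Dict Int Int :=
    event_days.foldl
      (fun m e => if 1 ≤ e ∧ e ≤ days then m.insert e (m.getD e 0 + 1) else m)
      PySem.Dict.empty
  let t := (PySem.List.sorted counts.keys (fun x => x) false).foldl (stepB counts)
      (n_shirts, n_shirts, 0, 1)
  (advanceB t.2.2.1 t.2.1 t.1 (days - t.2.2.2 + 1)).1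

-- ===== PRECONDITION & SPEC =====
def Spec_laundry (n_shirts : Int) (days : Int) (event_days : List Int) (out : Int) : Prop := out = laundry_alt n_shirts days event_days
instance (n_shirts : Int) (days : Int) (event_days : List Int) (out : Int) : Decidable (Spec_laundry n_shirts days event_days out) := by unfold Spec_laundry; infer_instance

-- ===== CLAIM (what is proved, stated in full; the proofs are below) =====
def Claim_equal_laundry : Prop := ∀ (n_shirts : Int) (days : Int) (event_days : List Int), Dom_laundry n_shirts days event_days → Spec_laundry n_shirts days event_days (laundry n_shirts days event_days)

-- ===== LEMMAS AND PROOFS =====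

-- one event-free day of A: state (clean, loads), capacity n
def nstep (n : Int) (s : Int × Int) : Int × Int :=
  if s.1 = 0 then (n - 1, s.2 + 1) else (s.1 - 1, s.2)

-- d event-free days of A
def iterN (n : Int) : Nat → Int × Int → Int × Int
  | 0, s => s
  | d + 1, s => iterN n d (nstep n s)

lemma iterN_add (n : Int) (a b : Nat) (s : Int × Int) :
    iterN n (a + b) s = iterN n b (iterN n a s) := by
  induction a generalizing s with
  | zero => simp [iterN]
  | succ a ih => simpa [iterN, Nat.succ_add] using ih (nstep n s)

lemma iterN_decr (n : Int) (d : Nat) (c L : Int) (h : c < 0 ∨ (d : Int) ≤ c) :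
    iterN n d (c, L) = (c - d, L) := by
  induction d generalizing c L with
  | zero => simp [iterN]
  | succ d ih =>
    have hc : c ≠ 0 := by omega
    rw [iterN, nstep]
    simp only [hc, if_false]
    rw [ih (c - 1) L (by omega)]
    simp only [Prod.mk.injEq, and_true]
    push_cast
    ring

lemma advanceB_eq_iterN (n : Int) (d : Nat) : ∀ (c L : Int),
    advanceB L c n (d : Int) = ((iterN n d (c, L)).2, (iterN n d (c, L)).1) := by
  induction d using Nat.strong_induction_on with
  | _ d ih =>
    intro c L
    match d with
    | 0 => rw [advanceB]; simp [iterN]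
    | Nat.succ d0 =>
      by_cases hc : c < 0 ∨ ((d0 + 1 : Nat) : Int) ≤ c
      · rw [advanceB]
        have h1 : (0:Int) < ((d0 + 1 : Nat) : Int) := by omega
        rw [if_pos h1, if_pos hc, iterN_decr n _ c L hc]
      · rw [not_or, not_lt, not_le] at hc
        obtain ⟨hc0, hcd⟩ := hc
        rw [advanceB]
        have h1 : (0:Int) < ((d0 + 1 : Nat) : Int) := by omega
        rw [if_pos h1, if_neg (by omega)]
        set d' : Nat := d0 + 1 - (c.toNat + 1) with hd'
        have hcast : ((d0 + 1 : Nat) : Int) - (c + 1) = (d' : Int) := by omega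
        rw [hcast, ih d' (by omega) (n - 1) (L + 1)]
        have hsplit : d0.succ = (c.toNat + 1) + d' := by omega
        rw [hsplit, iterN_add]
        have h2 : iterN n (c.toNat + 1) (c, L) = (n - 1, L + 1) := by
          rw [iterN_add n c.toNat 1, iterN_decr n c.toNat c L (Or.inr (by omega))]
          simp only [iterN, nstep]
          rw [if_pos (show c - (c.toNat : Int) = 0 by omega)]
        rw [h2]

lemma advanceB_nonpos (L c n d : Int) (h : d ≤ 0) : advanceB L c n d = (L, c) := by
  rw [advanceB, if_neg (by omega)]

-- an event-free stretch of A's loop is iterN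
lemma foldA_noevent (evs : List Int) (ds : List Int)
    (h : ∀ day ∈ ds, day ∉ evs) (n c L : Int) :
    ds.foldl (stepA evs) (n, c, L) =
      (n, (iterN n ds.length (c, L)).1, (iterN n ds.length (c, L)).2) := by
  induction ds generalizing c L with
  | nil => simp [iterN]
  | cons x t ih =>
    have hx : x ∉ evs := h x (List.mem_cons_self ..)
    rw [List.foldl_cons, stepA]
    simp only [if_neg hx]
    rw [List.length_cons]
    have : iterN n (t.length + 1) (c, L) = iterN n t.length (nstep n (c, L)) := by
      rw [iterN]
    rw [this, nstep]
    by_cases hc : c = 0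
    · simp only [hc]
      exact ih (fun day hd => h day (List.mem_cons_of_mem _ hd)) (n - 1) (L + 1)
    · simp only [hc, if_false]
      exact ih (fun day hd => h day (List.mem_cons_of_mem _ hd)) (c - 1) L

-- the core correspondence: walking the sorted event days equals A's day loop
lemma main_glue (evs : List Int) (days : Int) (counts : PySem.Dict Int Int) :
    ∀ (ks : List Int) (n c L cur : Int),
    ks.Pairwise (· < ·) →
    (∀ k ∈ ks, cur ≤ k ∧ k ≤ days) →
    (∀ day : Int, cur ≤ day → day ≤ days → (day ∈ evs ↔ day ∈ ks)) →
    (∀ k ∈ ks, counts.getD k 0 = (evs.count k : Int)) →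
    ((PySem.List.pyRange cur (days + 1) 1).foldl (stepA evs) (n, c, L)).2.2 =
      (let t := ks.foldl (stepB counts) (n, c, L, cur);
       (advanceB t.2.2.1 t.2.1 t.1 (days - t.2.2.2 + 1)).1) := by
  intro ks
  induction ks with
  | nil =>
    intro n c L cur _ _ hmem _
    simp only [List.foldl_nil]
    by_cases hle : cur ≤ days + 1
    · have hne : ∀ day ∈ PySem.List.pyRange cur (days + 1) 1, day ∉ evs := by
        intro day hd
        rw [PySem.List.mem_pyRange_one] at hd
        intro hin
        exact absurd ((hmem day hd.1 (by omega)).mp hin) (List.not_mem_nil)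
      rw [foldA_noevent evs _ hne n c L]
      have hlen : ((PySem.List.pyRange cur (days + 1) 1).length : Int) = days - cur + 1 := by
        rw [PySem.List.length_pyRange_one]; omega
      have := advanceB_eq_iterN n (PySem.List.pyRange cur (days + 1) 1).length c L
      rw [hlen] at this
      simp only [this]
    · rw [PySem.List.pyRange_one_eq_nil (by omega), advanceB_nonpos _ _ _ _ (by omega)]
      rfl
  | cons k rest ih =>
    intro n c L cur hpw hbnd hmem hcnt
    have hkb := hbnd k (List.mem_cons_self ..)
    have hrest_gt : ∀ j ∈ rest, k < j := (List.pairwise_cons.mp hpw).1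
    -- split the day range at k and k+1
    rw [PySem.List.pyRange_one_append cur k (days + 1) (by omega) (by omega),
        PySem.List.pyRange_one_append k (k + 1) (days + 1) (by omega) (by omega),
        PySem.List.pyRange_one_singleton, List.foldl_append, List.foldl_append]
    -- segment [cur, k): no events
    have hne : ∀ day ∈ PySem.List.pyRange cur k 1, day ∉ evs := by
      intro day hd hin
      rw [PySem.List.mem_pyRange_one] at hd
      have := (hmem day hd.1 (by omega)).mp hin
      rcases List.mem_cons.mp this with h | h
      · omega
      · exact absurd (hrest_gt day h) (by omega)
    rw [foldA_noevent evs _ hne n c L]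
    have hlen : ((PySem.List.pyRange cur k 1).length : Int) = k - cur := by
      rw [PySem.List.length_pyRange_one]; omega
    have hadv := advanceB_eq_iterN n (PySem.List.pyRange cur k 1).length c L
    rw [hlen] at hadv
    -- the event day k itself
    have hk_in : k ∈ evs := (hmem k (by omega) (by omega)).mpr (List.mem_cons_self ..)
    simp only [List.foldl_cons, List.foldl_nil]
    have hstep : stepB counts (n, c, L, cur) k =
        ((stepA evs (n, (iterN n (PySem.List.pyRange cur k 1).length (c, L)).1,
                        (iterN n (PySem.List.pyRange cur k 1).length (c, L)).2) k).1,
         (stepA evs (n, (iterN n (PySem.List.pyRange cur k 1).length (c, L)).1,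
                        (iterN n (PySem.List.pyRange cur k 1).length (c, L)).2) k).2.1,
         (stepA evs (n, (iterN n (PySem.List.pyRange cur k 1).length (c, L)).1,
                        (iterN n (PySem.List.pyRange cur k 1).length (c, L)).2) k).2.2,
         k + 1) := by
      simp only [stepB, stepA, hadv, if_pos hk_in, hcnt k (List.mem_cons_self ..)]
    rw [hstep]
    exact ih (stepA evs (n, (iterN n (PySem.List.pyRange cur k 1).length (c, L)).1,
                            (iterN n (PySem.List.pyRange cur k 1).length (c, L)).2) k).1
             (stepA evs (n, (iterN n (PySem.List.pyRange cur k 1).length (c, L)).1,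
                            (iterN n (PySem.List.pyRange cur k 1).length (c, L)).2) k).2.1
             (stepA evs (n, (iterN n (PySem.List.pyRange cur k 1).length (c, L)).1,
                            (iterN n (PySem.List.pyRange cur k 1).length (c, L)).2) k).2.2
             (k + 1)
             (List.pairwise_cons.mp hpw).2
             (fun j hj => ⟨by have := hrest_gt j hj; omega, (hbnd j (List.mem_cons_of_mem _ hj)).2⟩)
             (fun day h1 h2 => by
                rw [hmem day (by omega) h2, List.mem_cons]
                constructor
                · rintro (h | h)
                  · omega
                  · exact h
                · exact Or.inr)
             (fun j hj => hcnt j (List.mem_cons_of_mem _ hj))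

theorem laundry_spec : Claim_equal_laundry := by
  unfold Claim_equal_laundry
  intro n days evs _
  unfold Spec_laundry
  simp only [laundry, laundry_alt]
  set F := evs.filter (fun e => decide (1 ≤ e ∧ e ≤ days)) with hF
  have hcounts : evs.foldl
        (fun m e => if 1 ≤ e ∧ e ≤ days then m.insert e (m.getD e 0 + 1) else m)
        (PySem.Dict.empty : PySem.Dict Int Int)
      = F.foldl (fun m e => m.insert e (m.getD e 0 + 1)) PySem.Dict.empty :=
    PySem.List.foldl_ite_eq_foldl_filter _ _ _ _
  rw [hcounts]
  set counts := F.foldl (fun m e => m.insert e (m.getD e 0 + 1))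
      (PySem.Dict.empty : PySem.Dict Int Int) with hc
  have hgetD : ∀ k : Int, counts.getD k 0 = (F.count k : Int) := by
    intro k
    rw [hc, PySem.Dict.getD_foldl_insert_add_one (κ := Int)]
    simp
  have hkeys : ∀ k : Int, k ∈ counts.keys ↔ k ∈ F := by
    intro k
    rw [hc, PySem.Dict.keys_foldl_insert
          (f := fun (m : PySem.Dict Int Int) (e : Int) => m.getD e 0 + 1),
        PySem.Dict.keys_empty]
    have h : PySem.Set.update ([] : List Int) F = PySem.Set.ofList F := by
      rw [PySem.Set.ofList_eq_foldl]
      rfl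
    rw [h]
    exact PySem.Set.mem_ofList F k
  have hnodup : counts.keys.Nodup := by
    rw [hc]
    exact PySem.Dict.nodup_keys_foldl_insert _ _ _
      (by rw [PySem.Dict.keys_empty]; exact List.nodup_nil)
  set ks := PySem.List.sorted counts.keys (fun x => x) false with hks
  have hperm : ks.Perm counts.keys := PySem.List.sorted_perm ..
  have hmemks : ∀ k : Int, k ∈ ks ↔ k ∈ F := by
    intro k
    rw [hks, PySem.List.mem_sorted]
    exact hkeys k
  have hnd : ks.Nodup := hperm.nodup_iff.mpr hnodup
  have hle : ks.Pairwise (fun a b => a ≤ b) := PySem.List.sorted_pairwise ..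
  have hlt : ks.Pairwise (· < ·) :=
    (hle.and hnd).imp (fun h => lt_of_le_of_ne h.1 h.2)
  have hFmem : ∀ k ∈ F, 1 ≤ k ∧ k ≤ days := by
    intro k hk
    have := List.of_mem_filter hk
    simpa using this
  have hcF : ∀ k ∈ F, (F.count k : Int) = (evs.count k : Int) := by
    intro k hk
    have h1 := (hFmem k hk).1
    have h2 := (hFmem k hk).2
    simp [hF, List.count_filter, h1, h2]
  exact main_glue evs days counts ks n n 0 1 hlt
    (fun k hk => hFmem k ((hmemks k).mp hk))
    (fun day h1 h2 => by
      rw [hmemks day, hF, List.mem_filter]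
      simp [h1, h2])
    (fun k hk => by rw [hgetD k, hcF k ((hmemks k).mp hk)])
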